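-- pv_equiv track=rewrite | github.com/estevevg/crosssection | crosssection.py | applyShiftInterval
-- ===== SOURCE A (Python) =====
-- def applyShiftInterval(d1, d2, shift, i1, i2):
--     i = 0
--     outp = 0
--     for r in d1["read"]:
--         if i < i1 or i > i2:
--             outp += r - d2["read"][i] + shift
--         i += 1
--     return outp
-- ===== SOURCE B (Python) =====
-- def applyShiftInterval(d1, d2, shift, i1, i2):
--     r1 = d1["read"]
--     r2 = d2["read"]
--     n = len(r1)
--     a = min(n, max(0, i1))            # out-indices below the interval: [0, a)
--     b = max(a, min(n, i2 + 1))        # out-indices above the interval: [b, n)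
--     diffs = sum(r1[i] - r2[i] for i in range(a))
--     diffs += sum(r1[i] - r2[i] for i in range(b, n))
--     return diffs + shift * (a + (n - b))
-- ===== Notes on version B (the rewrite author's own statement) =====
-- stated objective: simpler
-- what changed: A's single branchy counting loop (per-element if on the index) is replaced by two unconditional sums over the clamped out-of-interval index ranges [0,a) and [b,n) plus a closed-form shift*count term.
-- outside the precondition, e.g. on applyShiftInterval({'read': []}, {}, 0, 0, 0): A returns 0, B raises KeyError; on applyShiftInterval({'read': [5, 6]}, {}, 3, 0, 1): A returns 0, B raises KeyError
import Mathlib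
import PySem

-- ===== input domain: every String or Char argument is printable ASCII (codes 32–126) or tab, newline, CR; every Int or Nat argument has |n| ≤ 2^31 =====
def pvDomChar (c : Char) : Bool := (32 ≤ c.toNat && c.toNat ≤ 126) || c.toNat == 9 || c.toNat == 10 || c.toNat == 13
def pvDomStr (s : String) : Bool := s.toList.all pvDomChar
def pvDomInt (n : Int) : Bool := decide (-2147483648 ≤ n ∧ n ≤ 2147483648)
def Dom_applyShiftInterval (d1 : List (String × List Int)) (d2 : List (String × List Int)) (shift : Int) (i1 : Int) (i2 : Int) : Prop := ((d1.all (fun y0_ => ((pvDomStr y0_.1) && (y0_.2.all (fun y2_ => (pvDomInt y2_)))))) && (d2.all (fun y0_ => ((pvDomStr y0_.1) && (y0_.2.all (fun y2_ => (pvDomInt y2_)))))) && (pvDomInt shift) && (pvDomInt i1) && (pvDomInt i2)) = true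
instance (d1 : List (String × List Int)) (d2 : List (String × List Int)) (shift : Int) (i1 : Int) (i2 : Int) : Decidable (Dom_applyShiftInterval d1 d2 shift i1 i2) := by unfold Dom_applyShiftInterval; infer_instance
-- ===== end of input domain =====

-- B replaces A's branchy counting loop by two unconditional slice-sums over the out-of-interval
-- index ranges [0,a) and [b,n) plus a closed-form shift contribution (objective: simpler decomposition).

-- ===== PORT A =====
def applyShiftInterval (d1 : List (String × List Int)) (d2 : List (String × List Int)) (shift : Int) (i1 : Int) (i2 : Int) : Int :=
  let r1 := ((PySem.Dict.mk d1).get? "read").getD []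
  let r2 := ((PySem.Dict.mk d2).get? "read").getD []
  (r1.foldl (fun (st : Int × Int) r =>
      (st.1 + 1,
        if st.1 < i1 ∨ st.1 > i2 then st.2 + (r - PySem.List.pyGetD r2 st.1 0 + shift) else st.2))
    (0, 0)).2

-- ===== PORT B =====
def applyShiftInterval_alt (d1 : List (String × List Int)) (d2 : List (String × List Int)) (shift : Int) (i1 : Int) (i2 : Int) : Int :=
  let r1 := ((PySem.Dict.mk d1).get? "read").getD []
  let r2 := ((PySem.Dict.mk d2).get? "read").getD []
  let n : Int := r1.length
  let a := min n (max 0 i1)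
  let b := max a (min n (i2 + 1))
  let diffs := (PySem.List.pyRange 0 a 1).foldl
      (fun acc i => acc + (PySem.List.pyGetD r1 i 0 - PySem.List.pyGetD r2 i 0)) 0
  let diffs := diffs + (PySem.List.pyRange b n 1).foldl
      (fun acc i => acc + (PySem.List.pyGetD r1 i 0 - PySem.List.pyGetD r2 i 0)) 0
  diffs + shift * (a + (n - b))

-- ===== PRECONDITION & SPEC =====
-- Pre_ excludes the inputs where Python A raises (a missing "read" key, or an out-of-interval
-- index reaching past d2["read"]) and, because B fetches d2["read"] unconditionally while A only
-- touches it at out-of-interval indices, the corner where d2 lacks "read" yet no index needs it: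
-- there A returns 0 by never looking, and B naturally raises KeyError.
def Pre_applyShiftInterval (d1 : List (String × List Int)) (d2 : List (String × List Int)) (shift : Int) (i1 : Int) (i2 : Int) : Prop :=
  ((PySem.Dict.mk d1).get? "read").isSome = true ∧ ((PySem.Dict.mk d2).get? "read").isSome = true ∧
  ∀ j < (((PySem.Dict.mk d1).get? "read").getD []).length,
    ((j : Int) < i1 ∨ (j : Int) > i2) → j < (((PySem.Dict.mk d2).get? "read").getD []).length
instance (d1 : List (String × List Int)) (d2 : List (String × List Int)) (shift : Int) (i1 : Int) (i2 : Int) : Decidable (Pre_applyShiftInterval d1 d2 shift i1 i2) := by unfold Pre_applyShiftInterval; infer_instance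

def pvWitness_applyShiftInterval : (List (String × List Int)) × (List (String × List Int)) × Int × Int × Int :=
  ([("read", [3, 1, 4])], [("read", [1, 1, 2])], 2, 1, 1)

def Spec_applyShiftInterval (d1 : List (String × List Int)) (d2 : List (String × List Int)) (shift : Int) (i1 : Int) (i2 : Int) (out : Int) : Prop := out = applyShiftInterval_alt d1 d2 shift i1 i2
instance (d1 : List (String × List Int)) (d2 : List (String × List Int)) (shift : Int) (i1 : Int) (i2 : Int) (out : Int) : Decidable (Spec_applyShiftInterval d1 d2 shift i1 i2 out) := by unfold Spec_applyShiftInterval; infer_instance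

-- ===== CLAIM (what is proved, stated in full; the proofs are below) =====
def Claim_equal_applyShiftInterval : Prop := ∀ (d1 : List (String × List Int)) (d2 : List (String × List Int)) (shift : Int) (i1 : Int) (i2 : Int), Dom_applyShiftInterval d1 d2 shift i1 i2 → Pre_applyShiftInterval d1 d2 shift i1 i2 → Spec_applyShiftInterval d1 d2 shift i1 i2 (applyShiftInterval d1 d2 shift i1 i2)

-- ===== LEMMAS AND PROOFS =====

-- A's counter loop is a fold over the enumeration of the list.
theorem pv_fold_counter (f : Int → Int → Int → Int) :
    ∀ (l : List Int) (k acc : Int),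
      (l.foldl (fun (st : Int × Int) r => (st.1 + 1, f st.1 st.2 r)) (k, acc)).2
        = (PySem.List.enumerate l k).foldl (fun a p => f p.1 a p.2) acc := by
  intro l
  induction l with
  | nil => intro k acc; simp [PySem.List.enumerate_nil]
  | cons x t ih => intro k acc; simp [PySem.List.enumerate_cons, List.foldl_cons, ih]

-- Generic: sum of F over consecutive integers [lo, hi).
def pvSum (F : Int → Int) (lo hi : Int) : Int := ((PySem.List.pyRange lo hi 1).map F).sum

theorem pvSum_split (F : Int → Int) (lo m hi : Int) (h1 : lo ≤ m) (h2 : m ≤ hi) :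
    pvSum F lo hi = pvSum F lo m + pvSum F m hi := by
  unfold pvSum
  rw [PySem.List.pyRange_one_append lo m hi h1 h2, List.map_append, List.sum_append]

theorem pvSum_congr (F G : Int → Int) (lo hi : Int)
    (h : ∀ j, lo ≤ j → j < hi → F j = G j) : pvSum F lo hi = pvSum G lo hi := by
  unfold pvSum
  apply congrArg
  apply List.map_congr_left
  intro j hj
  rw [PySem.List.mem_pyRange_one] at hj
  exact h j hj.1 hj.2

theorem pvSum_add (F G : Int → Int) (lo hi : Int) :
    pvSum (fun j => F j + G j) lo hi = pvSum F lo hi + pvSum G lo hi := by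
  unfold pvSum
  rw [PySem.List.sum_map_add_int]

theorem pvSum_const (c : Int) (lo hi : Int) (h : lo ≤ hi) :
    pvSum (fun _ => c) lo hi = c * (hi - lo) := by
  unfold pvSum
  rw [PySem.List.sum_map_const_int, PySem.List.length_pyRange_one,
    Int.toNat_of_nonneg (by omega : (0:Int) ≤ hi - lo)]
  ring

theorem pvSum_zero (lo hi : Int) : pvSum (fun _ => 0) lo hi = 0 := by
  unfold pvSum; simp

-- A equals the pvSum of the guarded per-index term over [0, n).
theorem pv_A_eq (d1 d2 : List (String × List Int)) (shift i1 i2 : Int) :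
    applyShiftInterval d1 d2 shift i1 i2
      = pvSum (fun j =>
          if j < i1 ∨ j > i2 then
            PySem.List.pyGetD (((PySem.Dict.mk d1).get? "read").getD []) j 0
              - PySem.List.pyGetD (((PySem.Dict.mk d2).get? "read").getD []) j 0 + shift
          else 0)
        0 (((PySem.Dict.mk d1).get? "read").getD []).length := by
  unfold applyShiftInterval
  set r1 := ((PySem.Dict.mk d1).get? "read").getD [] with hr1
  set r2 := ((PySem.Dict.mk d2).get? "read").getD [] with hr2
  rw [pv_fold_counter (fun i acc r => if i < i1 ∨ i > i2 then acc + (r - PySem.List.pyGetD r2 i 0 + shift) else acc)]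
  rw [PySem.List.enumerate_eq_map_pyRange r1 0]
  rw [List.foldl_map]
  have hc : ∀ (acc j : Int),
      (fun (a : Int) (p : Int × Int) => if p.1 < i1 ∨ p.1 > i2 then a + (p.2 - PySem.List.pyGetD r2 p.1 0 + shift) else a) acc (j, PySem.List.pyGetD r1 j 0)
        = acc + (if j < i1 ∨ j > i2 then PySem.List.pyGetD r1 j 0 - PySem.List.pyGetD r2 j 0 + shift else 0) := by
    intro acc j
    by_cases h : j < i1 ∨ j > i2 <;> simp [h]
  calc (PySem.List.pyRange 0 ↑r1.length 1).foldl
        (fun (a : Int) (j : Int) => (fun (a : Int) (p : Int × Int) => if p.1 < i1 ∨ p.1 > i2 then a + (p.2 - PySem.List.pyGetD r2 p.1 0 + shift) else a) a (j, PySem.List.pyGetD r1 j 0)) 0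
      = (PySem.List.pyRange 0 ↑r1.length 1).foldl
        (fun (a : Int) (j : Int) => a + (if j < i1 ∨ j > i2 then PySem.List.pyGetD r1 j 0 - PySem.List.pyGetD r2 j 0 + shift else 0)) 0 := by
        apply PySem.List.foldl_congr_mem
        intro acc j _
        exact hc acc j
    _ = _ := by
        rw [PySem.List.foldl_add]
        unfold pvSum
        simp

-- B's two range folds are pvSums.
theorem pv_B_eq (d1 d2 : List (String × List Int)) (shift i1 i2 : Int) :
    applyShiftInterval_alt d1 d2 shift i1 i2
      = (let r1 := ((PySem.Dict.mk d1).get? "read").getD []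
         let r2 := ((PySem.Dict.mk d2).get? "read").getD []
         let n : Int := r1.length
         let a := min n (max 0 i1)
         let b := max a (min n (i2 + 1))
         pvSum (fun j => PySem.List.pyGetD r1 j 0 - PySem.List.pyGetD r2 j 0) 0 a
           + pvSum (fun j => PySem.List.pyGetD r1 j 0 - PySem.List.pyGetD r2 j 0) b n
           + shift * (a + (n - b))) := by
  unfold applyShiftInterval_alt pvSum
  dsimp only
  rw [PySem.List.foldl_add, PySem.List.foldl_add]
  ring

theorem applyShiftInterval_spec_aux (d1 d2 : List (String × List Int)) (shift i1 i2 : Int) :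
    applyShiftInterval d1 d2 shift i1 i2 = applyShiftInterval_alt d1 d2 shift i1 i2 := by
  rw [pv_A_eq, pv_B_eq]
  set r1 := ((PySem.Dict.mk d1).get? "read").getD [] with hr1
  set r2 := ((PySem.Dict.mk d2).get? "read").getD [] with hr2
  set n : Int := (r1.length : Int) with hn
  set a := min n (max 0 i1) with ha
  set b := max a (min n (i2 + 1)) with hb
  have hn0 : 0 ≤ n := by positivity
  have h0a : (0:Int) ≤ a := by omega
  have hab : a ≤ b := by omega
  have hbn : b ≤ n := by omega
  set F : Int → Int := fun j =>
      if j < i1 ∨ j > i2 then PySem.List.pyGetD r1 j 0 - PySem.List.pyGetD r2 j 0 + shift else 0 with hF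
  set G : Int → Int := fun j => PySem.List.pyGetD r1 j 0 - PySem.List.pyGetD r2 j 0 with hG
  rw [pvSum_split F 0 a n h0a (le_trans hab hbn), pvSum_split F a b n hab hbn]
  have hlow : pvSum F 0 a = pvSum G 0 a + shift * a := by
    have : pvSum F 0 a = pvSum (fun j => G j + shift) 0 a := by
      apply pvSum_congr
      intro j hj0 hja
      have hout : j < i1 ∨ j > i2 := by omega
      simp [hF, hG, hout]
    rw [this, pvSum_add, pvSum_const shift 0 a h0a]; ring
  have hmid : pvSum F a b = 0 := by
    have : pvSum F a b = pvSum (fun _ => 0) a b := by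
      apply pvSum_congr
      intro j hja hjb
      have hin : ¬(j < i1 ∨ j > i2) := by omega
      simp [hF, hin]
    rw [this, pvSum_zero]
  have hhigh : pvSum F b n = pvSum G b n + shift * (n - b) := by
    have : pvSum F b n = pvSum (fun j => G j + shift) b n := by
      apply pvSum_congr
      intro j hjb hjn
      have hout : j < i1 ∨ j > i2 := by omega
      simp [hF, hG, hout]
    rw [this, pvSum_add, pvSum_const shift b n hbn]
  rw [hlow, hmid, hhigh]; ring

-- ===== VERDICT (by name: the statement is the Claim_ definition above) =====
theorem applyShiftInterval_spec : Claim_equal_applyShiftInterval := by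
  intro d1 d2 shift i1 i2 _ _
  exact applyShiftInterval_spec_aux d1 d2 shift i1 i2
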